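-- pv_equiv track=rewrite | github.com/lyndonkl/cricketmodel | src/data/feature_utils.py | _count_runs_wickets
-- ===== SOURCE A (Python) =====
-- from typing import Dict, List, Optional, Tuple
--
-- def _count_runs_wickets(deliveries: List[Dict]) -> Tuple[int, int, int]:
--     """Count total runs, wickets, and legal balls from deliveries."""
--     total_runs = 0
--     wickets = 0
--     legal_balls = 0
--
--     for d in deliveries:
--         total_runs += d['runs']['total']
--         if 'wickets' in d:
--             wickets += len(d['wickets'])
--         # Count legal balls (exclude wides and no-balls for ball count)
--         extras = d.get('extras', {})
--         if 'wides' not in extras and 'noballs' not in extras: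
--             legal_balls += 1
--
--     return total_runs, wickets, legal_balls
-- ===== SOURCE B (Python) =====
-- from typing import Dict, List, Tuple
--
-- def _count_runs_wickets(deliveries: List[Dict]) -> Tuple[int, int, int]:
--     """Count total runs, wickets, and legal balls from deliveries.
--
--     Divide-and-conquer monoidal reduction: each delivery maps to a
--     (runs, wickets, legal) triple; halves are reduced recursively and
--     combined by componentwise addition (correct since + is associative)."""
--     def contrib(d):
--         extras = d.get('extras', {})
--         legal = 0 if ('wides' in extras or 'noballs' in extras) else 1
--         return (d['runs']['total'], len(d.get('wickets', [])), legal)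
--
--     def reduce(ds):
--         if not ds:
--             return (0, 0, 0)
--         if len(ds) == 1:
--             return contrib(ds[0])
--         mid = len(ds) // 2
--         a = reduce(ds[:mid])
--         b = reduce(ds[mid:])
--         return (a[0] + b[0], a[1] + b[1], a[2] + b[2])
--
--     return reduce(deliveries)
-- ===== Notes on version B (the rewrite author's own statement) =====
-- stated objective: alternative
-- what changed: Replaces A's single left-to-right loop carrying three accumulators by a divide-and-conquer monoidal reduction: each delivery is mapped to a (runs, wickets, legal) triple and list halves are reduced recursively and combined by componentwise addition.
import Mathlib
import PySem

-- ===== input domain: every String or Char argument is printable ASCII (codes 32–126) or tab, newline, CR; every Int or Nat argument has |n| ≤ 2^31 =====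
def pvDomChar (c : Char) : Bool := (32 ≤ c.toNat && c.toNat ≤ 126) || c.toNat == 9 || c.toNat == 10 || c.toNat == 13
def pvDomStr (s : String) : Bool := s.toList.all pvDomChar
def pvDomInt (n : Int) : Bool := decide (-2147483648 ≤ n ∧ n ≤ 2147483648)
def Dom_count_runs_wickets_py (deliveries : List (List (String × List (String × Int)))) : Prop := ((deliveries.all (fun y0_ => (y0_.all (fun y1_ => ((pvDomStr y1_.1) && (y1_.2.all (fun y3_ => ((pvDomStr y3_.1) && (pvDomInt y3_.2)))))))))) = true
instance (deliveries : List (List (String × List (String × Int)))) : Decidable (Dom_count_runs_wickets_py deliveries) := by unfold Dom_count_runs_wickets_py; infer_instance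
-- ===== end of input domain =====

-- B replaces A's single left-to-right loop with three accumulators by a
-- divide-and-conquer monoidal reduction over per-delivery triples; same values.

-- ===== PORT A =====
-- A's single loop, carrying the three accumulators (total_runs, wickets, legal_balls).
def count_runs_wickets_py (deliveries : List (List (String × List (String × Int)))) : Int × Int × Int :=
  deliveries.foldl
    (fun acc d =>
      -- total_runs += d['runs']['total']
      let r := acc.1 + ((List.lookup "total" ((List.lookup "runs" d).getD [])).getD 0)
      -- if 'wickets' in d: wickets += len(d['wickets'])
      let w := if (List.lookup "wickets" d).isSome
               then acc.2.1 + (((List.lookup "wickets" d).getD []).length : Int)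
               else acc.2.1
      -- extras = d.get('extras', {}); if 'wides' not in extras and 'noballs' not in extras: legal_balls += 1
      let extras := (List.lookup "extras" d).getD []
      let l := if (List.lookup "wides" extras).isNone && (List.lookup "noballs" extras).isNone
               then acc.2.2 + 1 else acc.2.2
      (r, w, l))
    (0, 0, 0)

-- ===== PORT B =====
-- contrib(d): the (runs, wickets, legal) triple of one delivery.
def pvContrib (d : List (String × List (String × Int))) : Int × Int × Int :=
  let extras := (List.lookup "extras" d).getD []
  let legal : Int :=
    if (List.lookup "wides" extras).isSome || (List.lookup "noballs" extras).isSome then 0 else 1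
  ((List.lookup "total" ((List.lookup "runs" d).getD [])).getD 0,
   (((List.lookup "wickets" d).getD []).length : Int),
   legal)

-- reduce(ds): split at the midpoint, recurse, add componentwise.
def pvReduce : List (List (String × List (String × Int))) → Int × Int × Int
  | [] => (0, 0, 0)
  | [d] => pvContrib d
  | d1 :: d2 :: rest =>
    let ds := d1 :: d2 :: rest
    let mid := ds.length / 2
    let a := pvReduce (ds.take mid)
    let b := pvReduce (ds.drop mid)
    (a.1 + b.1, a.2.1 + b.2.1, a.2.2 + b.2.2)
termination_by ds => ds.length
decreasing_by
  · simp only [List.length_take, List.length_cons]; omega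
  · simp only [List.length_drop, List.length_cons]; omega

def count_runs_wickets_py_alt (deliveries : List (List (String × List (String × Int)))) : Int × Int × Int :=
  pvReduce deliveries

-- ===== PRECONDITION & SPEC =====
-- Pre_ excludes exactly the inputs where Python A raises KeyError: a delivery
-- without a 'runs' key, or whose 'runs' dict lacks 'total'.
def Pre_count_runs_wickets_py (deliveries : List (List (String × List (String × Int)))) : Prop :=
  (deliveries.all (fun d =>
    match List.lookup "runs" d with
    | some rd => (List.lookup "total" rd).isSome
    | none => false)) = true
instance (deliveries : List (List (String × List (String × Int)))) : Decidable (Pre_count_runs_wickets_py deliveries) := by unfold Pre_count_runs_wickets_py; infer_instance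

def pvWitness_count_runs_wickets_py : (List (List (String × List (String × Int)))) :=
  [[("runs", [("total", 4)]), ("wickets", [("caught", 1)]), ("extras", [("byes", 1)])],
   [("runs", [("total", 1)]), ("extras", [("wides", 1)])]]

def Spec_count_runs_wickets_py (deliveries : List (List (String × List (String × Int)))) (out : Int × Int × Int) : Prop := out = count_runs_wickets_py_alt deliveries
instance (deliveries : List (List (String × List (String × Int)))) (out : Int × Int × Int) : Decidable (Spec_count_runs_wickets_py deliveries out) := by unfold Spec_count_runs_wickets_py; infer_instance

-- ===== CLAIM (what is proved, stated in full; the proofs are below) =====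
def Claim_equal_count_runs_wickets_py : Prop := ∀ (deliveries : List (List (String × List (String × Int)))), Dom_count_runs_wickets_py deliveries → Pre_count_runs_wickets_py deliveries → Spec_count_runs_wickets_py deliveries (count_runs_wickets_py deliveries)

-- ===== LEMMAS AND PROOFS =====

-- B's divide-and-conquer equals the componentwise sums of the per-delivery triples.
theorem pvReduce_eq_aux : ∀ (n : Nat) (ds : List (List (String × List (String × Int)))),
    ds.length ≤ n →
    pvReduce ds = ((ds.map (fun d => (pvContrib d).1)).sum,
                   (ds.map (fun d => (pvContrib d).2.1)).sum,
                   (ds.map (fun d => (pvContrib d).2.2)).sum) := by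
  intro n
  induction n with
  | zero =>
    intro ds h
    match ds with
    | [] => simp [pvReduce]
    | d :: _ => simp at h
  | succ n ih =>
    intro ds h
    match ds with
    | [] => simp [pvReduce]
    | [d] => simp [pvReduce]
    | d1 :: d2 :: rest =>
      have hT := ih ((d1 :: d2 :: rest).take ((d1 :: d2 :: rest).length / 2))
        (by simp at h ⊢; omega)
      have hD := ih ((d1 :: d2 :: rest).drop ((d1 :: d2 :: rest).length / 2))
        (by simp at h ⊢; omega)
      rw [pvReduce]
      simp only [hT, hD]
      conv_rhs => rw [← List.take_append_drop ((d1 :: d2 :: rest).length / 2) (d1 :: d2 :: rest)]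
      simp only [List.map_append, List.sum_append]

theorem pvReduce_eq (ds : List (List (String × List (String × Int)))) :
    pvReduce ds = ((ds.map (fun d => (pvContrib d).1)).sum,
                   (ds.map (fun d => (pvContrib d).2.1)).sum,
                   (ds.map (fun d => (pvContrib d).2.2)).sum) :=
  pvReduce_eq_aux ds.length ds le_rfl

-- A's fold, shifted out of an arbitrary accumulator, gives the same three sums.
theorem pv_foldA (ds : List (List (String × List (String × Int)))) :
    ∀ (r w l : Int),
      ds.foldl
        (fun acc d =>
          (acc.1 + (List.lookup "total" ((List.lookup "runs" d).getD [])).getD 0,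
           if (List.lookup "wickets" d).isSome = true
           then acc.2.1 + (((List.lookup "wickets" d).getD []).length : Int)
           else acc.2.1,
           if ((List.lookup "wides" ((List.lookup "extras" d).getD [])).isNone &&
               (List.lookup "noballs" ((List.lookup "extras" d).getD [])).isNone) = true
           then acc.2.2 + 1 else acc.2.2)) (r, w, l)
      = (r + (ds.map (fun d => (pvContrib d).1)).sum,
         w + (ds.map (fun d => (pvContrib d).2.1)).sum,
         l + (ds.map (fun d => (pvContrib d).2.2)).sum) := by
  induction ds with
  | nil => intro r w l; simp
  | cons d ds ih =>
    intro r w l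
    simp only [List.foldl_cons, List.map_cons, List.sum_cons, ih, Prod.mk.injEq]
    refine ⟨by simp [pvContrib]; ring, ?_, ?_⟩
    · unfold pvContrib
      split
      · simp; ring
      · rename_i h
        rw [Option.not_isSome_iff_eq_none] at h
        simp [h]
    · unfold pvContrib
      rcases hw : (List.lookup "wides" ((List.lookup "extras" d).getD [])) with _ | v <;>
        rcases hn : (List.lookup "noballs" ((List.lookup "extras" d).getD [])) with _ | u <;>
        simp [hw, hn] <;> try ring

-- ===== VERDICT (by name: the statement is the Claim_ definition above) =====
theorem count_runs_wickets_py_spec : Claim_equal_count_runs_wickets_py := by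
  intro ds _ _
  show count_runs_wickets_py ds = count_runs_wickets_py_alt ds
  unfold count_runs_wickets_py count_runs_wickets_py_alt
  rw [pvReduce_eq]
  simpa using pv_foldA ds 0 0 0
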